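-- pv_equiv track=rewrite | github.com/Thangtn52751/AIDiscordBot | bot/commands/userinfo.py | _format_roles
-- ===== SOURCE A (Python) =====
-- def _format_roles(roles: list[str]) -> str:
--     if not roles:
--         return "Không có role"
--
--     joined = ", ".join(roles)
--     if len(joined) <= 1024:
--         return joined
--
--     visible_roles: list[str] = []
--     current_length = 0
--
--     for role in roles:
--         extra_length = len(role) if not visible_roles else len(role) + 2
--         if current_length + extra_length > 1000:
--             break
--         visible_roles.append(role)
--         current_length += extra_length
--
--     hidden_count = len(roles) - len(visible_roles)
--     suffix = f"\n... và {hidden_count} role khác"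
--     return ", ".join(visible_roles) + suffix
-- ===== SOURCE B (Python) =====
-- from itertools import accumulate
-- from bisect import bisect_right
--
-- def _format_roles(roles: list[str]) -> str:
--     if not roles:
--         return "Không có role"
--
--     joined = ", ".join(roles)
--     if len(joined) <= 1024:
--         return joined
--
--     # cumulative length of ", ".join(roles[:i+1]); monotone non-decreasing
--     cum = list(accumulate((len(r) + 2 for r in roles), initial=-2))[1:]
--     k = bisect_right(cum, 1000)
--     hidden_count = len(roles) - k
--     return ", ".join(roles[:k]) + f"\n... và {hidden_count} role khác"
-- ===== Notes on version B (the rewrite author's own statement) =====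
-- stated objective: alternative
-- what changed: The incremental break-loop that accumulates visible roles one by one is replaced by building the cumulative joined-length table with itertools.accumulate and finding the cutoff index with bisect_right, then slicing the visible prefix.
import Mathlib
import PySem

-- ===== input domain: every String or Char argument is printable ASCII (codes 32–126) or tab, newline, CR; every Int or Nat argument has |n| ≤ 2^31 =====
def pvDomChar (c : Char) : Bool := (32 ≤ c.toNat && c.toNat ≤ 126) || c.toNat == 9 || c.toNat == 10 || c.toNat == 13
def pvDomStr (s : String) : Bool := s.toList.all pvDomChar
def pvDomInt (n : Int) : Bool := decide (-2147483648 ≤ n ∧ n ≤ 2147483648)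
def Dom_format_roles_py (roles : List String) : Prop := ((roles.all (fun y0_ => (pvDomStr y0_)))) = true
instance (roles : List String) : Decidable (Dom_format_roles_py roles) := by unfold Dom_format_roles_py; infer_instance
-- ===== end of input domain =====

-- B replaces A's incremental break-loop by a cumulative-length table + bisect_right; objective: alternative decomposition (same asymptotic cost).

-- ===== PORT A =====
-- A's for-loop with break: state (visible_roles, current_length), stop on first overflow.
def formatRolesLoopA : List String → List String → Int → List String × Int
  | [], vis, cur => (vis, cur)
  | role :: rest, vis, cur =>
    let extra : Int := if vis.isEmpty then PySem.Str.len role else PySem.Str.len role + 2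
    if cur + extra > 1000 then (vis, cur)
    else formatRolesLoopA rest (vis ++ [role]) (cur + extra)

def format_roles_py (roles : List String) : String :=
  if roles.isEmpty then "Không có role"
  else
    let joined := PySem.Str.join ", " roles
    if PySem.Str.len joined ≤ 1024 then joined
    else
      let vis := (formatRolesLoopA roles [] 0).1
      let hidden : Int := (roles.length : Int) - (vis.length : Int)
      PySem.Str.join ", " vis ++ "\n... và " ++ PySem.Int.toStr hidden ++ " role khác"

-- ===== PORT B =====
def format_roles_py_alt (roles : List String) : String :=
  if roles.isEmpty then "Không có role"
  else
    let joined := PySem.Str.join ", " roles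
    if PySem.Str.len joined ≤ 1024 then joined
    else
      -- cum[i] = len(", ".join(roles[:i+1])) : accumulate((len(r)+2 for r in roles), initial=-2)[1:]
      let cum := ((roles.map (fun r => PySem.Str.len r + 2)).scanl (· + ·) (-2)).tail
      let k := PySem.List.bisectRight cum (1000 : Int)
      let hidden : Int := (roles.length : Int) - (k : Int)
      PySem.Str.join ", " (PySem.List.slice roles none (some (k : Int))) ++
        "\n... và " ++ PySem.Int.toStr hidden ++ " role khác"

-- ===== PRECONDITION & SPEC =====
def Spec_format_roles_py (roles : List String) (out : String) : Prop := out = format_roles_py_alt roles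
instance (roles : List String) (out : String) : Decidable (Spec_format_roles_py roles out) := by unfold Spec_format_roles_py; infer_instance

-- ===== CLAIM (what is proved, stated in full; the proofs are below) =====
def Claim_equal_format_roles_py : Prop := ∀ (roles : List String), Dom_format_roles_py roles → Spec_format_roles_py roles (format_roles_py roles)

-- ===== LEMMAS AND PROOFS =====

-- number of further roles A's loop accepts, all charged len+2 (visible already nonempty)
def cntA : List String → Int → Nat
  | [], _ => 0
  | r :: rest, cur =>
    if cur + (PySem.Str.len r + 2) > 1000 then 0
    else cntA rest (cur + (PySem.Str.len r + 2)) + 1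

theorem scanl_head (b : Int) (l : List Int) :
    l.scanl (· + ·) b = b :: (l.scanl (· + ·) b).tail := by
  cases l <;> simp [List.scanl]

theorem loopA_eq_take (rs : List String) : ∀ (vis : List String) (cur : Int), vis ≠ [] →
    (formatRolesLoopA rs vis cur).1 = vis ++ rs.take (cntA rs cur) := by
  induction rs with
  | nil => intro vis cur _; simp [formatRolesLoopA, cntA]
  | cons r rest ih =>
    intro vis cur hv
    have hvis : vis.isEmpty = false := by simp [hv]
    simp only [formatRolesLoopA, cntA, hvis, Bool.false_eq_true, if_false]
    by_cases h : 1000 < cur + (PySem.Str.len r + 2)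
    · rw [if_pos h, if_pos h]; simp
    · rw [if_neg h, if_neg h, ih (vis ++ [r]) _ (by simp)]
      simp

theorem cntA_eq_takeWhile (rs : List String) : ∀ (cur : Int),
    cntA rs cur =
      (((rs.map (fun r => PySem.Str.len r + 2)).scanl (· + ·) cur).tail.takeWhile
        (fun a => decide (a ≤ 1000))).length := by
  induction rs with
  | nil => intro cur; simp [cntA, List.scanl]
  | cons r rest ih =>
    intro cur
    simp only [List.map_cons, List.scanl_cons, List.tail_cons]
    rw [scanl_head (cur + (PySem.Str.len r + 2)) (rest.map (fun r => PySem.Str.len r + 2)),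
      List.takeWhile_cons]
    by_cases h : cur + (PySem.Str.len r + 2) ≤ 1000
    · rw [cntA, if_neg (by omega), ih (cur + (PySem.Str.len r + 2))]
      simp only [h, decide_true, if_true, List.length_cons]
    · rw [cntA, if_pos (by omega)]
      simp only [h, decide_false, Bool.false_eq_true, if_false, List.length_nil]

theorem scanl_le (l : List Int) : ∀ (b : Int), (∀ x ∈ l, 0 ≤ x) →
    ∀ a ∈ l.scanl (· + ·) b, b ≤ a := by
  induction l with
  | nil => intro b _ a ha; simp [List.scanl] at ha; omega
  | cons x xs ih =>
    intro b hx a ha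
    simp only [List.scanl_cons, List.mem_cons] at ha
    rcases ha with rfl | ha
    · exact le_refl a
    · have h1 := ih (b + x) (fun y hy => hx y (by simp [hy])) a ha
      have h2 := hx x (by simp)
      omega

theorem scanl_pairwise (l : List Int) : ∀ (b : Int), (∀ x ∈ l, 0 ≤ x) →
    (l.scanl (· + ·) b).Pairwise (· ≤ ·) := by
  induction l with
  | nil => intro b _; simp [List.scanl]
  | cons x xs ih =>
    intro b hx
    simp only [List.scanl_cons, List.pairwise_cons]
    refine ⟨fun a ha => ?_, ih (b + x) (fun y hy => hx y (by simp [hy]))⟩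
    have h1 := scanl_le xs (b + x) (fun y hy => hx y (by simp [hy])) a ha
    have h2 := hx x (by simp)
    omega

theorem takeWhile_le_iff (xs : List Int) (h : xs.Pairwise (· ≤ ·)) :
    ∀ (j : Nat) (hj : j < xs.length),
      (j < (xs.takeWhile (fun a => decide (a ≤ 1000))).length ↔ xs[j] ≤ 1000) := by
  induction xs with
  | nil => intro j hj; simp at hj
  | cons x l ih =>
    intro j hj
    rw [List.pairwise_cons] at h
    rw [List.takeWhile_cons]
    by_cases hx : x ≤ 1000
    · simp only [hx, decide_true, if_true, List.length_cons]
      cases j with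
      | zero => simpa using hx
      | succ j =>
        have := ih h.2 j (by simpa using hj)
        simpa using this
    · simp only [hx, decide_false, Bool.false_eq_true, if_false, List.length_nil]
      cases j with
      | zero => simpa using hx
      | succ j =>
        have hjl : j < l.length := by simpa using hj
        have := h.1 l[j] (List.getElem_mem hjl)
        simp only [List.getElem_cons_succ]
        omega

theorem bisectRight_eq_takeWhile (xs : List Int) (h : xs.Pairwise (· ≤ ·)) :
    PySem.List.bisectRight xs (1000 : Int) = (xs.takeWhile (fun a => decide (a ≤ 1000))).length := by
  obtain ⟨hk1, hk2, hk3⟩ := PySem.List.bisectRight_spec xs 1000 h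
  have ht1 : (xs.takeWhile (fun a => decide (a ≤ 1000))).length ≤ xs.length :=
    (List.takeWhile_prefix _).length_le
  have ht2 := takeWhile_le_iff xs h
  rcases lt_trichotomy (PySem.List.bisectRight xs (1000 : Int))
      ((xs.takeWhile (fun a => decide (a ≤ 1000))).length) with h1 | h1 | h1
  · have hlt : PySem.List.bisectRight xs (1000 : Int) < xs.length := lt_of_lt_of_le h1 ht1
    have hle := (ht2 _ hlt).1 h1
    have := hk3 _ hlt le_rfl
    omega
  · exact h1
  · have hlt : (xs.takeWhile (fun a => decide (a ≤ 1000))).length < xs.length :=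
      lt_of_lt_of_le h1 hk1
    have hle := hk2 _ hlt h1
    have := (ht2 _ hlt).2 hle
    omega

theorem cost_nonneg (rs : List String) :
    ∀ x ∈ rs.map (fun r => PySem.Str.len r + 2), 0 ≤ x := by
  intro x hx
  simp only [List.mem_map] at hx
  obtain ⟨r, _, rfl⟩ := hx
  simp [PySem.Str.len_eq]
  positivity

-- the key identity: A's break-loop result is the bisect-determined prefix
theorem key_take (roles : List String) (hne : roles ≠ []) :
    (formatRolesLoopA roles [] 0).1 =
      roles.take (PySem.List.bisectRight
        (((roles.map (fun r => PySem.Str.len r + 2)).scanl (· + ·) (-2)).tail) (1000 : Int)) := by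
  obtain ⟨r0, rest, rfl⟩ := List.exists_cons_of_ne_nil hne
  have hcum : (((r0 :: rest).map (fun r => PySem.Str.len r + 2)).scanl (· + ·) (-2)).tail
      = (rest.map (fun r => PySem.Str.len r + 2)).scanl (· + ·) (PySem.Str.len r0) := by
    simp only [List.map_cons, List.scanl_cons, List.tail_cons]
    congr 1
    omega
  rw [hcum]
  have hpw := scanl_pairwise (rest.map (fun r => PySem.Str.len r + 2)) (PySem.Str.len r0)
    (cost_nonneg rest)
  rw [bisectRight_eq_takeWhile _ hpw,
    scanl_head (PySem.Str.len r0) (rest.map (fun r => PySem.Str.len r + 2)),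
    List.takeWhile_cons]
  by_cases h : PySem.Str.len r0 ≤ 1000
  · simp only [h, decide_true, if_true, List.length_cons]
    rw [List.take_succ_cons, ← cntA_eq_takeWhile rest (PySem.Str.len r0)]
    show (formatRolesLoopA (r0 :: rest) [] 0).1 = r0 :: rest.take (cntA rest (PySem.Str.len r0))
    simp only [formatRolesLoopA, List.isEmpty_nil, if_true, List.nil_append, zero_add]
    rw [if_neg (by omega)]
    rw [loopA_eq_take rest [r0] _ (by simp)]
    simp
  · simp only [h, decide_false, Bool.false_eq_true, if_false, List.length_nil, List.take_zero]
    simp only [formatRolesLoopA, List.isEmpty_nil, if_true, zero_add]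
    rw [if_pos (by omega)]

theorem bisect_le_len (roles : List String) :
    PySem.List.bisectRight
      (((roles.map (fun r => PySem.Str.len r + 2)).scanl (· + ·) (-2)).tail) (1000 : Int)
      ≤ roles.length := by
  have h := (PySem.List.bisectRight_spec
    (((roles.map (fun r => PySem.Str.len r + 2)).scanl (· + ·) (-2)).tail) 1000
      ((scanl_pairwise _ (-2) (cost_nonneg roles)).sublist (List.tail_sublist _))).1
  calc PySem.List.bisectRight _ _ ≤ _ := h
    _ ≤ roles.length := by simp [List.length_tail, List.length_scanl]

-- ===== VERDICT (by name: the statement is the Claim_ definition above) =====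
theorem format_roles_py_spec : Claim_equal_format_roles_py := by
  intro roles _
  unfold Spec_format_roles_py format_roles_py format_roles_py_alt
  by_cases hne : roles.isEmpty
  · simp [hne]
  · simp only [hne, Bool.false_eq_true, if_false]
    by_cases hlen : PySem.Str.len (PySem.Str.join ", " roles) ≤ 1024
    · rw [if_pos hlen, if_pos hlen]
    · rw [if_neg hlen, if_neg hlen]
      have hkey := key_take roles (by simpa [List.isEmpty_iff] using hne)
      have hk := bisect_le_len roles
      rw [hkey, PySem.List.slice_to_natCast, List.length_take, min_eq_left hk]
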